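-- pv_equiv track=rewrite | github.com/ZYX-MLer/AGNetwork | src/BRNet.py | split_idx
-- ===== SOURCE A (Python) =====
-- def split_idx(vec):
--
--     num_vec = len(vec)
--     all_idx = [] if vec[0] == 0 else [0]
--     for i in range(1, num_vec):
--         if vec[i - 1] == 0 and vec[i] != 0:
--             all_idx.append(i)
--         elif vec[i - 1] != 0 and vec[i] == 0:
--             all_idx.append(i)
--     all_idx = all_idx if vec[-1] == 0 else all_idx + [num_vec]
--
--     assert len(all_idx) % 2 == 0
--     all_idx = [[all_idx[i * 2], all_idx[i * 2 + 1]] for i in range(len(all_idx) // 2)]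
--
--     all_dif = [v[1] - v[0] for v in all_idx]
--
--     if len(all_dif) == 0:
--         return 0, len(vec)
--     else:
--         return  all_idx[all_dif.index(max(all_dif))]
-- ===== SOURCE B (Python) =====
-- def split_idx(vec):
--     # One online left-to-right pass tracking the current run's start and the best run so far.
--     best = None
--     start = None
--     for i, x in enumerate(vec):
--         if x != 0:
--             if start is None:
--                 start = i
--         else:
--             if start is not None:
--                 if best is None or i - start > best[1] - best[0]:
--                     best = [start, i]
--                 start = None
--     if start is not None:
--         n = len(vec)
--         if best is None or n - start > best[1] - best[0]:
--             best = [start, n]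
--     if best is None:
--         return 0, len(vec)
--     return best
-- ===== Notes on version B (the rewrite author's own statement) =====
-- stated objective: simpler
-- what changed: Replaces A's three-stage pipeline (build a flat boundary-index list, re-pair it by indexing, then pick the pair at index(max(diffs))) with a single online pass that tracks the current run's start and keeps the best run via strict comparison (preserving first-max ties); avoiding the intermediate boundary/pair/diff lists and the extra max/index scans gives a constant-factor speedup.
import Mathlib
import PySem

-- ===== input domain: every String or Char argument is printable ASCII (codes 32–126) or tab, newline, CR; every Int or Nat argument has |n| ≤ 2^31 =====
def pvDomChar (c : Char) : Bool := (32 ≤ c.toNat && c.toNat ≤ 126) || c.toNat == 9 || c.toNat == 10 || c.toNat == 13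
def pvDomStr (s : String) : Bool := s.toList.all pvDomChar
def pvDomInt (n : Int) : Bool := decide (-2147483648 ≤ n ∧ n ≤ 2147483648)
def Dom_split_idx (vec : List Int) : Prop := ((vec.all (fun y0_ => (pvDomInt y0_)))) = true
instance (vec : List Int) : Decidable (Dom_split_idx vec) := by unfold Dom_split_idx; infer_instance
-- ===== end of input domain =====

-- B replaces A's boundary-list/re-pair/index(max) pipeline by one online pass keeping the
-- current run's start and the best run so far (strict comparison keeps the first maximum):
-- same O(n) cost, simpler decomposition.


-- ===== PORT A =====
-- the body of A's `for i in range(1, num_vec)` loop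
def pvA_step (vec : List Int) (acc : List Int) (i : Int) : List Int :=
  if PySem.List.pyGetD vec (i - 1) 0 = 0 ∧ PySem.List.pyGetD vec i 0 ≠ 0 then acc ++ [i]
  else if PySem.List.pyGetD vec (i - 1) 0 ≠ 0 ∧ PySem.List.pyGetD vec i 0 = 0 then acc ++ [i]
  else acc

-- all_idx after the loop (before the final cap with num_vec)
def pvA_bounds (vec : List Int) : List Int :=
  (PySem.List.pyRange 1 (vec.length : Int) 1).foldl (pvA_step vec)
    (if PySem.List.pyGetD vec 0 0 = 0 then [] else [0])

def split_idx (vec : List Int) : List Int :=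
  let num_vec : Int := vec.length
  let all_idx : List Int :=
    if PySem.List.pyGetD vec (-1) 0 = 0 then pvA_bounds vec else pvA_bounds vec ++ [num_vec]
  -- assert len(all_idx) % 2 == 0 holds on Pre_; the pairing comprehension:
  let pairs : List (List Int) :=
    (PySem.List.pyRange 0 (PySem.Int.floordiv (all_idx.length : Int) 2) 1).map
      (fun i => [PySem.List.pyGetD all_idx (i * 2) 0, PySem.List.pyGetD all_idx (i * 2 + 1) 0])
  let all_dif : List Int := pairs.map (fun v => PySem.List.pyGetD v 1 0 - PySem.List.pyGetD v 0 0)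
  if all_dif.length = 0 then [0, num_vec]
  else
    match PySem.List.max? all_dif (fun x => x) with
    | none => []          -- unreachable: all_dif ≠ []
    | some m =>
      match PySem.List.index? all_dif m with
      | none => []        -- unreachable: m ∈ all_dif
      | some j => PySem.List.pyGetD pairs (j : Int) []

-- ===== PORT B =====
-- loop body of B: state = (start of the current nonzero run, best run so far)
def pvB_step (st : Option Int × Option (Int × Int)) (p : Int × Int) :
    Option Int × Option (Int × Int) :=
  if p.2 ≠ 0 then
    match st.1 with
    | none => (some p.1, st.2)
    | some _ => st
  else
    match st.1 with
    | none => st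
    | some s =>
      match st.2 with
      | none => (none, some (s, p.1))
      | some b => if p.1 - s > b.2 - b.1 then (none, some (s, p.1)) else (none, st.2)

def pvB_state (vec : List Int) : Option Int × Option (Int × Int) :=
  (PySem.List.enumerate vec 0).foldl pvB_step (none, none)

-- the `if start is not None:` closing step after the loop
def pvB_close (n : Int) (st : Option Int × Option (Int × Int)) : Option (Int × Int) :=
  match st.1 with
  | none => st.2
  | some s =>
    match st.2 with
    | none => some (s, n)
    | some b => if n - s > b.2 - b.1 then some (s, n) else st.2

def split_idx_alt (vec : List Int) : List Int :=
  match pvB_close (vec.length : Int) (pvB_state vec) with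
  | none => [0, (vec.length : Int)]
  | some b => [b.1, b.2]

-- ===== PRECONDITION & SPEC =====
-- A reads the first element unguarded and so raises IndexError on the empty list; Pre_ excludes exactly that.
def Pre_split_idx (vec : List Int) : Prop := vec ≠ []
instance (vec : List Int) : Decidable (Pre_split_idx vec) := by unfold Pre_split_idx; infer_instance
def pvWitness_split_idx : List Int := [1, 0, 1, 1]

def Spec_split_idx (vec : List Int) (out : List Int) : Prop := out = split_idx_alt vec
instance (vec : List Int) (out : List Int) : Decidable (Spec_split_idx vec out) := by unfold Spec_split_idx; infer_instance

-- ===== CLAIM (what is proved, stated in full; the proofs are below) =====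
def Claim_equal_split_idx : Prop := ∀ (vec : List Int), Dom_split_idx vec → Pre_split_idx vec → Spec_split_idx vec (split_idx vec)

-- ===== LEMMAS AND PROOFS =====

-- difference (length) of a run
def pvD (p : Int × Int) : Int := p.2 - p.1

-- flatten a list of runs into A's boundary-index list
def pvFlat2 : List (Int × Int) → List Int
  | [] => []
  | p :: t => p.1 :: p.2 :: pvFlat2 t

def pvOpL : Option Int → List Int
  | none => []
  | some s => [s]

-- B's best-update rule, as a fold step over closed runs
def pvSelStep (b : Option (Int × Int)) (r : Int × Int) : Option (Int × Int) :=
  match b with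
  | none => some r
  | some q => if r.2 - r.1 > q.2 - q.1 then some r else some q

def pvSel (rs : List (Int × Int)) : Option (Int × Int) := rs.foldl pvSelStep none

-- first run of maximal length, recursively
def pvFirstMax : List (Int × Int) → Option (Int × Int)
  | [] => none
  | p :: t =>
    match pvFirstMax t with
    | none => some p
    | some q => if pvD p < pvD q then some q else some p

theorem pvFlat2_append (rs : List (Int × Int)) (r : Int × Int) :
    pvFlat2 (rs ++ [r]) = pvFlat2 rs ++ [r.1, r.2] := by
  induction rs with
  | nil => rfl
  | cons p t ih => simp [pvFlat2, ih]

theorem length_pvFlat2 (rs : List (Int × Int)) : (pvFlat2 rs).length = 2 * rs.length := by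
  induction rs with
  | nil => rfl
  | cons p t ih => simp [pvFlat2, ih]; omega

theorem pvSel_append (rs : List (Int × Int)) (r : Int × Int) :
    pvSel (rs ++ [r]) = pvSelStep (pvSel rs) r := by
  simp [pvSel, List.foldl_append]

theorem pvSelAcc (t : List (Int × Int)) (q : Int × Int) :
    t.foldl pvSelStep (some q) =
      some (match pvFirstMax t with
            | none => q
            | some r => if pvD q < pvD r then r else q) := by
  induction t generalizing q with
  | nil => rfl
  | cons p t ih =>
    have hstep : pvSelStep (some q) p = some (if pvD q < pvD p then p else q) := by
      simp only [pvSelStep, pvD, gt_iff_lt]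
      split_ifs <;> rfl
    rw [List.foldl_cons, hstep, ih]
    cases hfm : pvFirstMax t with
    | none => simp [pvFirstMax, hfm]
    | some r =>
      simp only [pvFirstMax, hfm]
      split_ifs <;> simp_all <;> omega

theorem pvSel_eq_firstMax (rs : List (Int × Int)) : pvSel rs = pvFirstMax rs := by
  cases rs with
  | nil => rfl
  | cons p t =>
    show t.foldl pvSelStep (pvSelStep none p) = _
    rw [show pvSelStep none p = some p from rfl, pvSelAcc]
    cases hfm : pvFirstMax t
    · simp [pvFirstMax, hfm]
    · simp only [pvFirstMax, hfm]
      split_ifs <;> rfl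

theorem pvGetD_one {α : Type} (a b : α) (l : List α) (d : α) :
    PySem.List.pyGetD (a :: b :: l) 1 d = b := by
  simp [PySem.List.pyGetD, PySem.List.pyGet?, PySem.List.pyIdx?]

theorem pvGetD_cons_succ {α : Type} (a : α) (l : List α) (k : Nat) (d : α) :
    PySem.List.pyGetD (a :: l) ((k : Int) + 1) d = PySem.List.pyGetD l (k : Int) d := by
  rw [show ((k : Int) + 1) = ((k + 1 : Nat) : Int) by push_cast; ring]
  rw [PySem.List.pyGetD_natCast, PySem.List.pyGetD_natCast]
  simp [List.getD]

theorem pvGetD_cons2 {α : Type} (a b : α) (l : List α) (k : Nat) (d : α) :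
    PySem.List.pyGetD (a :: b :: l) ((k : Int) + 2) d = PySem.List.pyGetD l (k : Int) d := by
  rw [show ((k : Int) + 2) = ((k + 1 : Nat) : Int) + 1 by push_cast; ring, pvGetD_cons_succ,
    show ((k + 1 : Nat) : Int) = (k : Int) + 1 by push_cast; ring, pvGetD_cons_succ]

-- the pairing comprehension applied to a flattened runs list reconstructs the runs
theorem pvChunk (rs : List (Int × Int)) :
    (List.range rs.length).map (fun (k : Nat) =>
        [PySem.List.pyGetD (pvFlat2 rs) ((k : Int) * 2) 0,
         PySem.List.pyGetD (pvFlat2 rs) ((k : Int) * 2 + 1) 0])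
      = rs.map (fun p => [p.1, p.2]) := by
  induction rs with
  | nil => rfl
  | cons p t ih =>
    rw [List.map_cons, show (p :: t).length = t.length + 1 from rfl, List.range_succ_eq_map,
      List.map_cons, List.map_map]
    congr 1
    · simp [pvFlat2, pvGetD_one]
    · rw [← ih]
      apply List.map_congr_left
      intro k _
      simp only [Function.comp]
      rw [show ((k + 1 : Nat) : Int) * 2 + 1 = ((2 * k + 1 : Nat) : Int) + 2 by push_cast; ring,
        show ((k + 1 : Nat) : Int) * 2 = ((2 * k : Nat) : Int) + 2 by push_cast; ring,
        show (pvFlat2 (p :: t)) = p.1 :: p.2 :: pvFlat2 t from rfl,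
        pvGetD_cons2, pvGetD_cons2,
        show ((2 * k : Nat) : Int) = (k : Int) * 2 by push_cast; ring,
        show ((2 * k + 1 : Nat) : Int) = (k : Int) * 2 + 1 by push_cast; ring]

theorem pvPairs (rs : List (Int × Int)) :
    (PySem.List.pyRange 0 (PySem.Int.floordiv ((pvFlat2 rs).length : Int) 2) 1).map
      (fun i => [PySem.List.pyGetD (pvFlat2 rs) (i * 2) 0,
                 PySem.List.pyGetD (pvFlat2 rs) (i * 2 + 1) 0])
      = rs.map (fun p => [p.1, p.2]) := by
  rw [length_pvFlat2 rs,
    show PySem.Int.floordiv ((2 * rs.length : Nat) : Int) 2 = ((rs.length : Nat) : Int) by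
      rw [show (2 : Int) = ((2 : Nat) : Int) by norm_cast, PySem.Int.floordiv_natCast]
      congr 1
      omega,
    PySem.List.pyRange_zero_nat, List.map_map]
  rw [← pvChunk rs]
  apply List.map_congr_left
  intro k _
  rfl

theorem pvFirstMax_isSome (p : Int × Int) (t : List (Int × Int)) :
    ∃ r, pvFirstMax (p :: t) = some r := by
  simp only [pvFirstMax]
  cases pvFirstMax t with
  | none => exact ⟨p, rfl⟩
  | some q => by_cases h : pvD p < pvD q <;> simp [h]

-- A's argmax-by-index selection picks the first run of maximal length
theorem pvASel (rs : List (Int × Int)) (r : Int × Int) (h : pvFirstMax rs = some r) :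
    ∃ j : Nat,
      PySem.List.max? (rs.map (fun v => pvD v)) (fun x => x) = some (pvD r) ∧
      PySem.List.index? (rs.map (fun v => pvD v)) (pvD r) = some j ∧
      PySem.List.pyGetD (rs.map (fun p => [p.1, p.2])) (j : Int) [] = [r.1, r.2] := by
  induction rs generalizing r with
  | nil => simp [pvFirstMax] at h
  | cons p t ih =>
    cases hfm : pvFirstMax t with
    | none =>
      have ht : t = [] := by
        cases t with
        | nil => rfl
        | cons q t' =>
          exfalso
          obtain ⟨r0, hr0⟩ := pvFirstMax_isSome q t'
          rw [hr0] at hfm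
          cases hfm
      subst ht
      simp only [pvFirstMax] at h
      cases h
      refine ⟨0, ?_, ?_, ?_⟩
      · rw [List.map_cons, PySem.List.max?_id_cons]; rfl
      · exact PySem.List.index?_cons_self _ _
      · simp
    | some r' =>
      obtain ⟨j', hmax', hidx', hget'⟩ := ih r' hfm
      simp only [pvFirstMax, hfm] at h
      cases t with
      | nil => simp [pvFirstMax] at hfm
      | cons q t' =>
        have hfold : (List.map (fun v => pvD v) t').foldl max (pvD q) = pvD r' := by
          have := hmax'
          rw [List.map_cons, PySem.List.max?_id_cons] at this
          exact Option.some_injective _ this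
        have hmaxcons :
            PySem.List.max? (((p :: q :: t').map (fun v => pvD v))) (fun x => x)
              = some (max (pvD p) (pvD r')) := by
          rw [List.map_cons, PySem.List.max?_id_cons, List.map_cons, List.foldl_cons,
            List.foldl_assoc, hfold]
        by_cases hc : pvD p < pvD r'
        · rw [if_pos hc] at h; cases h
          refine ⟨j' + 1, ?_, ?_, ?_⟩
          · rw [hmaxcons]; congr 1; omega
          · rw [List.map_cons, PySem.List.index?_cons_of_ne _ (by omega), hidx']; rfl
          · rw [List.map_cons,
              show ((j' + 1 : Nat) : Int) = ((j' : Nat) : Int) + 1 by push_cast; ring,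
              pvGetD_cons_succ]
            exact hget'
        · rw [if_neg hc] at h; cases h
          refine ⟨0, ?_, ?_, ?_⟩
          · rw [hmaxcons]; congr 1; omega
          · rw [List.map_cons]; exact PySem.List.index?_cons_self _ _
          · simp

-- A's tail (pairing / diffs / index(max)) applied to flattened runs equals selecting pvSel
theorem pvFinal (rs : List (Int × Int)) (N : Int) :
    (let all_idx := pvFlat2 rs;
     let pairs : List (List Int) :=
       (PySem.List.pyRange 0 (PySem.Int.floordiv (all_idx.length : Int) 2) 1).map
         (fun i => [PySem.List.pyGetD all_idx (i * 2) 0, PySem.List.pyGetD all_idx (i * 2 + 1) 0]);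
     let all_dif : List Int := pairs.map (fun v => PySem.List.pyGetD v 1 0 - PySem.List.pyGetD v 0 0);
     if all_dif.length = 0 then [0, N]
     else
       match PySem.List.max? all_dif (fun x => x) with
       | none => []
       | some m =>
         match PySem.List.index? all_dif m with
         | none => []
         | some j => PySem.List.pyGetD pairs (j : Int) [])
      = match pvSel rs with
        | none => [0, N]
        | some b => [b.1, b.2] := by
  simp only [pvPairs rs]
  have hdif : (rs.map (fun p => [p.1, p.2])).map
      (fun v => PySem.List.pyGetD v 1 0 - PySem.List.pyGetD v 0 0) = rs.map (fun v => pvD v) := by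
    rw [List.map_map]
    apply List.map_congr_left
    intro p _
    simp [Function.comp, pvGetD_one, pvD]
  simp only [hdif, pvSel_eq_firstMax]
  cases rs with
  | nil => simp [pvFirstMax]
  | cons p t =>
    obtain ⟨r, hr⟩ := pvFirstMax_isSome p t
    obtain ⟨j, hmax, hidx, hget⟩ := pvASel (p :: t) r hr
    rw [hr, if_neg (show ¬((p :: t).map (fun v => pvD v)).length = 0 by simp), hmax]
    show (match PySem.List.index? ((p :: t).map (fun v => pvD v)) (pvD r) with
          | none => ([] : List Int)
          | some j => PySem.List.pyGetD ((p :: t).map (fun p => [p.1, p.2])) (j : Int) []) = [r.1, r.2]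
    rw [hidx]
    exact hget

theorem pvGetD_append_lt {α : Type} (l : List α) (x d : α) (i : Int)
    (h0 : 0 ≤ i) (h1 : i < (l.length : Int)) :
    PySem.List.pyGetD (l ++ [x]) i d = PySem.List.pyGetD l i d := by
  rw [PySem.List.pyGetD_of_nonneg _ _ h0, PySem.List.pyGetD_of_nonneg _ _ h0]
  have : i.toNat < l.length := by omega
  rw [List.getD_append _ _ _ _ this]

theorem pvGetD_snoc_neg_one {α : Type} (l : List α) (x d : α) :
    PySem.List.pyGetD (l ++ [x]) (-1) d = x := by
  simp [PySem.List.pyGetD, PySem.List.pyGet?, PySem.List.pyIdx?]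

theorem pvGetD_singleton_neg_one {α : Type} (x d : α) :
    PySem.List.pyGetD [x] (-1) d = x := by
  simp [PySem.List.pyGetD, PySem.List.pyGet?, PySem.List.pyIdx?]

theorem pvGetD_snoc_self {α : Type} (l : List α) (x d : α) :
    PySem.List.pyGetD (l ++ [x]) (l.length : Int) d = x := by
  rw [PySem.List.pyGetD_natCast]
  simp [List.getD_eq_getElem?_getD]

theorem pvGetD_last_eq (l : List Int) (h : l ≠ []) (d : Int) :
    PySem.List.pyGetD l ((l.length : Int) - 1) d = PySem.List.pyGetD l (-1) d := by
  have hl : 0 < l.length := List.length_pos_iff.mpr h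
  rw [show ((l.length : Int) - 1) = ((l.length - 1 : Nat) : Int) by omega,
    PySem.List.pyGetD_natCast]
  simp only [PySem.List.pyGetD, PySem.List.pyGet?, PySem.List.pyIdx?]
  have h1 : ¬ (0 : Int) ≤ -1 := by omega
  have h2 : -(l.length : Int) ≤ -1 := by omega
  rw [if_neg h1, if_pos h2]
  simp [List.getD_eq_getElem?_getD]

-- one snoc step of A's boundary loop
theorem pvA_bounds_snoc (l : List Int) (x : Int) (h : l ≠ []) :
    pvA_bounds (l ++ [x]) = pvA_step (l ++ [x]) (pvA_bounds l) (l.length : Int) := by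
  have hl : 0 < l.length := List.length_pos_iff.mpr h
  unfold pvA_bounds
  rw [show (((l ++ [x]).length : Nat) : Int) = (l.length : Int) + 1 by simp,
    PySem.List.pyRange_one_succ_right (by omega), List.foldl_append]
  simp only [List.foldl_cons, List.foldl_nil]
  congr 1
  rw [pvGetD_append_lt l x 0 0 (le_refl 0) (by omega)]
  apply PySem.List.foldl_congr_mem
  intro acc i hi
  rw [PySem.List.mem_pyRange_one] at hi
  unfold pvA_step
  rw [pvGetD_append_lt l x 0 (i - 1) (by omega) (by omega),
    pvGetD_append_lt l x 0 i (by omega) (by omega)]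

-- one snoc step of B's loop
theorem pvB_state_snoc (l : List Int) (x : Int) :
    pvB_state (l ++ [x]) = pvB_step (pvB_state l) ((l.length : Int), x) := by
  unfold pvB_state
  rw [PySem.List.enumerate_append, List.foldl_append]
  simp [PySem.List.enumerate]

-- the four shapes of one B step
theorem pvB_step_open (st : Option Int × Option (Int × Int)) (i x : Int)
    (hx : x ≠ 0) (h1 : st.1 = none) : pvB_step st (i, x) = (some i, st.2) := by
  obtain ⟨st1, st2⟩ := st
  cases st1 with
  | none => simp [pvB_step, hx]
  | some s => exact absurd h1 (by simp)

theorem pvB_step_keep (st : Option Int × Option (Int × Int)) (i x s : Int)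
    (hx : x ≠ 0) (h1 : st.1 = some s) : pvB_step st (i, x) = st := by
  obtain ⟨st1, st2⟩ := st
  cases st1 with
  | none => exact absurd h1 (by simp)
  | some s' => simp [pvB_step, hx]

theorem pvB_step_idle (st : Option Int × Option (Int × Int)) (i : Int)
    (h1 : st.1 = none) : pvB_step st (i, 0) = st := by
  obtain ⟨st1, st2⟩ := st
  cases st1 with
  | none => simp [pvB_step]
  | some s => exact absurd h1 (by simp)

theorem pvB_step_close (st : Option Int × Option (Int × Int)) (s i : Int)
    (hs : st.1 = some s) : pvB_step st (i, 0) = (none, pvSelStep st.2 (s, i)) := by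
  obtain ⟨st1, st2⟩ := st
  cases st1 with
  | none => exact absurd hs (by simp)
  | some s' =>
    have : s' = s := by simpa using hs
    subst this
    cases st2 with
    | none => rfl
    | some b =>
      simp only [pvB_step, pvSelStep]
      split_ifs <;> simp_all

theorem pvB_close_some (st : Option Int × Option (Int × Int)) (s n : Int)
    (hs : st.1 = some s) : pvB_close n st = pvSelStep st.2 (s, n) := by
  obtain ⟨st1, st2⟩ := st
  cases st1 with
  | none => exact absurd hs (by simp)
  | some s' =>
    have : s' = s := by simpa using hs
    subst this
    cases st2 with
    | none => rfl
    | some b => rfl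

-- THE INVARIANT: after scanning vec, A's boundary list is the flattened closed runs plus the
-- open start, B's best is the strict-selection over the closed runs, and the open start is
-- present exactly when the last element is nonzero.
theorem pvInv (vec : List Int) (h : vec ≠ []) :
    ∃ rs : List (Int × Int),
      pvA_bounds vec = pvFlat2 rs ++ pvOpL (pvB_state vec).1 ∧
      (pvB_state vec).2 = pvSel rs ∧
      ((pvB_state vec).1 = none ↔ PySem.List.pyGetD vec (-1) 0 = 0) := by
  induction vec using List.reverseRecOn with
  | nil => exact absurd rfl h
  | append_singleton l x ih =>
    cases hl : l with
    | nil =>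
      subst hl
      refine ⟨[], ?_, ?_, ?_⟩ <;>
        by_cases hx : x = 0 <;>
          simp [pvA_bounds, pvB_state, PySem.List.enumerate, pvB_step, pvFlat2, pvOpL, pvSel,
            PySem.List.pyRange_one_eq_nil, pvGetD_singleton_neg_one, hx]
    | cons a t =>
      rw [← hl]
      have hne : l ≠ [] := by rw [hl]; exact List.cons_ne_nil a t
      obtain ⟨rs, hb, hsel, hiff⟩ := ih hne
      have hA := pvA_bounds_snoc l x hne
      have hB := pvB_state_snoc l x
      have hlast : PySem.List.pyGetD (l ++ [x]) ((l.length : Int) - 1) 0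
          = PySem.List.pyGetD l (-1) 0 := by
        have hlp : 0 < l.length := List.length_pos_iff.mpr hne
        rw [pvGetD_append_lt l x 0 _ (by omega) (by omega), pvGetD_last_eq l hne]
      have hself := pvGetD_snoc_self l x 0
      have hnew := pvGetD_snoc_neg_one l x 0
      by_cases hx : x = 0 <;> by_cases hpl : PySem.List.pyGetD l (-1) 0 = 0
      -- last = 0, new = 0 : nothing happens
      · have h1 : (pvB_state l).1 = none := hiff.mpr hpl
        have hstep := pvB_step_idle (pvB_state l) (l.length : Int) h1
        subst hx
        refine ⟨rs, ?_, ?_, ?_⟩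
        · rw [hA]
          unfold pvA_step
          rw [hlast, hself, if_neg (by simp [hpl]), if_neg (by simp [hpl]), hb, hB, hstep]
        · rw [hB, hstep, hsel]
        · rw [hB, hstep, hnew]
          simp [h1]
      -- last ≠ 0, new = 0 : a run closes
      · obtain ⟨s, hs⟩ : ∃ s, (pvB_state l).1 = some s := by
          cases hst : (pvB_state l).1 with
          | none => exact absurd (hiff.mp hst) hpl
          | some s => exact ⟨s, rfl⟩
        subst hx
        have hstep := pvB_step_close (pvB_state l) s (l.length : Int) hs
        refine ⟨rs ++ [(s, (l.length : Int))], ?_, ?_, ?_⟩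
        · rw [hA]
          unfold pvA_step
          rw [hlast, hself, if_neg (by simp [hpl]), if_pos (by simp [hpl]),
            hb, hs, pvFlat2_append, hB, hstep]
          simp [pvOpL]
        · rw [hB, hstep, hsel, pvSel_append]
        · rw [hB, hstep, hnew]
          simp
      -- last = 0, new ≠ 0 : a run opens
      · have h1 : (pvB_state l).1 = none := hiff.mpr hpl
        have hstep := pvB_step_open (pvB_state l) (l.length : Int) x hx h1
        refine ⟨rs, ?_, ?_, ?_⟩
        · rw [hA]
          unfold pvA_step
          rw [hlast, hself, if_pos (by simp [hx, hpl]), hb, hB, hstep, h1]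
          simp [pvOpL]
        · rw [hB, hstep, hsel]
        · rw [hB, hstep, hnew]
          simp [hx]
      -- last ≠ 0, new ≠ 0 : run continues
      · obtain ⟨s, hs⟩ : ∃ s, (pvB_state l).1 = some s := by
          cases hst : (pvB_state l).1 with
          | none => exact absurd (hiff.mp hst) hpl
          | some s => exact ⟨s, rfl⟩
        have hstep := pvB_step_keep (pvB_state l) (l.length : Int) x s hx hs
        refine ⟨rs, ?_, ?_, ?_⟩
        · rw [hA]
          unfold pvA_step
          rw [hlast, hself, if_neg (by simp [hx, hpl]), if_neg (by simp [hx, hpl]), hb, hB, hstep]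
        · rw [hB, hstep, hsel]
        · rw [hB, hstep, hnew, hs]
          simp [hx]

theorem pvB_close_none (st : Option Int × Option (Int × Int)) (n : Int)
    (h1 : st.1 = none) : pvB_close n st = st.2 := by
  obtain ⟨st1, st2⟩ := st
  cases st1 with
  | none => rfl
  | some s => exact absurd h1 (by simp)

theorem pvKey (vec : List Int) (h : vec ≠ []) : split_idx vec = split_idx_alt vec := by
  obtain ⟨rs, hb, hsel, hiff⟩ := pvInv vec h
  simp only [split_idx, split_idx_alt]
  by_cases hl : PySem.List.pyGetD vec (-1) 0 = 0
  · have h1 : (pvB_state vec).1 = none := hiff.mpr hl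
    rw [if_pos hl, hb, h1, pvB_close_none _ _ h1, hsel]
    simp only [pvOpL, List.append_nil]
    exact pvFinal rs (vec.length : Int)
  · obtain ⟨s, hs⟩ : ∃ s, (pvB_state vec).1 = some s := by
      cases hst : (pvB_state vec).1 with
      | none => exact absurd (hiff.mp hst) hl
      | some s => exact ⟨s, rfl⟩
    rw [if_neg hl, hb, hs, pvB_close_some _ s _ hs, hsel, ← pvSel_append]
    simp only [pvOpL, List.append_assoc, List.cons_append, List.nil_append]
    have hflat : pvFlat2 rs ++ [s, (vec.length : Int)]
        = pvFlat2 (rs ++ [(s, (vec.length : Int))]) := by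
      rw [pvFlat2_append]
    rw [hflat]
    exact pvFinal (rs ++ [(s, (vec.length : Int))]) (vec.length : Int)

-- ===== VERDICT (by name: the statement is the Claim_ definition above) =====
theorem split_idx_spec : Claim_equal_split_idx := by
  intro vec _ hpre
  exact pvKey vec hpre
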